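-- pv_equiv track=rewrite | github.com/7shivamx/FilingAnalyzer-Backend | app.py | get_correct_value
-- ===== SOURCE A (Python) =====
-- def get_correct_value(possible_values, output_values):
--     correct_values = []
--     for val1 in output_values:
--         for val2 in possible_values:
--             if val1 == val2 and val1 not in correct_values:
--                 correct_values.append(val1)
--     if len(correct_values) > 0:
--         return correct_values[-1]
--     return ''
-- ===== SOURCE B (Python) =====
-- def get_correct_value(possible_values, output_values):
--     possible = set(possible_values)
--     first = {}
--     for i, v in enumerate(output_values):
--         if v not in first:
--             first[v] = i
--     best, best_i = '', -1
--     for v, i in first.items():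
--         if v in possible and i > best_i:
--             best, best_i = v, i
--     return best
-- ===== Notes on version B (the rewrite author's own statement) =====
-- stated objective: faster
-- what changed: Instead of A's nested loops building an ordered result list and taking its last element, B records each value's first-occurrence index in a dict in one pass and then returns the value in possible_values whose first occurrence is latest (an argmax over indices).
import Mathlib
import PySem

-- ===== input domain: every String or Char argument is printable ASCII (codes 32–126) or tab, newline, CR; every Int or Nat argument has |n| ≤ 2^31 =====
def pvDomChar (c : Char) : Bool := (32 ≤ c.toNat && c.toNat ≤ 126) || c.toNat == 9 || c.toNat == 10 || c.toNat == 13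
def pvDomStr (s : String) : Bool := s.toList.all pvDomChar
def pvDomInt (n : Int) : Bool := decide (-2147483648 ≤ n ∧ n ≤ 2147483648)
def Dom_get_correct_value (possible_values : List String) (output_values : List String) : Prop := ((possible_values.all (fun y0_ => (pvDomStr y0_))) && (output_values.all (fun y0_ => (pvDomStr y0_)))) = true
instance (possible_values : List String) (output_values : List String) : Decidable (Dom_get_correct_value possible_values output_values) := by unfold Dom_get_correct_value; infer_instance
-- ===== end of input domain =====

-- B records each value's first-occurrence index in one pass and returns the matching value with
-- the latest first occurrence (argmax over indices), replacing A's nested loops that build an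
-- ordered result list; objective: faster, same return value everywhere.

-- ===== PORT A =====
-- literal port of A: nested foldl over output_values/possible_values building correct_values;
-- under the 'len > 0' guard, Python's correct_values[-1] is the last element (getLastD "").
def get_correct_value (possible_values : List String) (output_values : List String) : String :=
  let correct_values :=
    output_values.foldl (fun cv val1 =>
      possible_values.foldl (fun cv val2 =>
        if val1 == val2 && !(cv.contains val1) then cv ++ [val1] else cv) cv) []
  if correct_values.length > 0 then correct_values.getLastD "" else ""

-- ===== PORT B =====
-- port of Source B: set(possible_values) = PySem.Set.ofList; 'for i, v in enumerate(...)' =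
-- foldl over PySem.List.enumerate building a PySem.Dict of first-occurrence indices;
-- then a (best, best_i) accumulator loop over first.items().
def get_correct_value_alt (possible_values : List String) (output_values : List String) : String :=
  let possible := PySem.Set.ofList possible_values
  let first : PySem.Dict String Int :=
    (PySem.List.enumerate output_values).foldl
      (fun d p => if !(PySem.Dict.contains d p.2) then PySem.Dict.insert d p.2 p.1 else d)
      PySem.Dict.empty
  let r : String × Int :=
    (PySem.Dict.items first).foldl
      (fun acc p => if PySem.Set.contains possible p.1 && acc.2 < p.2 then p else acc)
      ("", -1)
  r.1

-- ===== PRECONDITION & SPEC =====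
def Spec_get_correct_value (possible_values : List String) (output_values : List String) (out : String) : Prop := out = get_correct_value_alt possible_values output_values
instance (possible_values : List String) (output_values : List String) (out : String) : Decidable (Spec_get_correct_value possible_values output_values out) := by unfold Spec_get_correct_value; infer_instance

-- ===== CLAIM (what is proved, stated in full; the proofs are below) =====
def Claim_equal_get_correct_value : Prop := ∀ (possible_values : List String) (output_values : List String), Dom_get_correct_value possible_values output_values → Spec_get_correct_value possible_values output_values (get_correct_value possible_values output_values)

-- ===== LEMMAS AND PROOFS =====

-- A's inner loop over possible_values appends val1 at most once: it acts as a single conditional append.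
lemma inner_loop (pv : List String) (v : String) (cv : List String) :
    pv.foldl (fun cv val2 => if v == val2 && !(cv.contains v) then cv ++ [v] else cv) cv
      = if pv.contains v && !(cv.contains v) then cv ++ [v] else cv := by
  induction pv generalizing cv with
  | nil => simp
  | cons p ps ih =>
    rw [List.foldl_cons]
    by_cases h2 : v ∈ cv
    · rw [show (if v == p && !cv.contains v then cv ++ [v] else cv) = cv by simp [h2], ih]
      simp [h2]
    · by_cases h1 : v = p
      · subst h1
        rw [show (if v == v && !cv.contains v then cv ++ [v] else cv) = cv ++ [v] by simp [h2], ih]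
        simp [h2]
      · rw [show (if v == p && !cv.contains v then cv ++ [v] else cv) = cv by simp [h1], ih]
        simp [h1]

-- A's outer loop, with the inner loop collapsed, computes the membership-filter of the running dedup set.
lemma outer_loop (pv : List String) (ov : List String) :
    ∀ (s acc : List String), acc = s.filter (fun v => pv.contains v) →
    ov.foldl (fun cv v => if pv.contains v && !(cv.contains v) then cv ++ [v] else cv) acc
      = (ov.foldl PySem.Set.add s).filter (fun v => pv.contains v) := by
  induction ov with
  | nil => intro s acc h; simpa using h
  | cons v ov ih =>
    intro s acc h
    simp only [List.foldl_cons]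
    by_cases hs : v ∈ s
    · have hadd : PySem.Set.add s v = s := by simp [PySem.Set.add, hs]
      rw [hadd]
      by_cases hp : v ∈ pv
      · have hacc : v ∈ acc := by subst h; simp [List.mem_filter, hs, hp]
        rw [if_neg (by simp [hacc])]
        exact ih s acc h
      · rw [if_neg (by simp [hp])]
        exact ih s acc h
    · have hadd : PySem.Set.add s v = s ++ [v] := by simp [PySem.Set.add, hs]
      rw [hadd]
      have hnacc : v ∉ acc := by subst h; simp [List.mem_filter, hs]
      by_cases hp : v ∈ pv
      · rw [if_pos (by simp [hp, hnacc])]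
        exact ih (s ++ [v]) (acc ++ [v]) (by simp [h, List.filter_append, hp])
      · rw [if_neg (by simp [hp])]
        exact ih (s ++ [v]) acc (by simp [h, List.filter_append, hp])

lemma contains_ofList (pv : List String) (v : String) :
    PySem.Set.contains (PySem.Set.ofList pv) v = pv.contains v := by
  simp only [PySem.Set.contains, List.contains_eq_mem]
  exact decide_eq_decide.mpr (PySem.Set.mem_ofList pv v)

-- (proof-only) the first-occurrence (value, index) pairs B's dict accumulates.
def fiSpec (seen : List String) (n : Int) : List String → List (String × Int)
  | [] => []
  | v :: vs => if seen.contains v then fiSpec seen (n + 1) vs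
               else (v, n) :: fiSpec (seen ++ [v]) (n + 1) vs

lemma dict_build (ov : List String) :
    ∀ (n : Int) (d : PySem.Dict String Int), (PySem.Dict.keys d).Nodup →
    ((PySem.List.enumerate ov n).foldl
        (fun d p => if !(PySem.Dict.contains d p.2) then PySem.Dict.insert d p.2 p.1 else d)
        d).items
      = d.items ++ fiSpec (PySem.Dict.keys d) n ov := by
  induction ov with
  | nil => intro n d _; simp [PySem.List.enumerate, fiSpec]
  | cons v vs ih =>
    intro n d hnd
    rw [PySem.List.enumerate_cons, List.foldl_cons]
    by_cases hc : PySem.Dict.contains d v = true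
    · simp only [hc, Bool.not_true, Bool.false_eq_true, if_false]
      have hk : (PySem.Dict.keys d).contains v = true := by
        rw [List.contains_eq_mem, decide_eq_true_iff]
        exact (PySem.Dict.contains_iff_mem_keys d v).mp hc
      rw [ih (n + 1) d hnd, fiSpec, if_pos hk]
    · have hc' : PySem.Dict.contains d v = false := by revert hc; cases PySem.Dict.contains d v <;> simp
      simp only [hc', Bool.not_false, if_true]
      have hkeys : PySem.Dict.keys (PySem.Dict.insert d v n) = PySem.Dict.keys d ++ [v] :=
        PySem.Dict.keys_insert_of_not_contains d n hc'
      have hitems : (PySem.Dict.insert d v n).items = d.items ++ [(v, n)] :=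
        PySem.Dict.items_insert_of_not_contains d n hc'
      have hnd' : (PySem.Dict.keys (PySem.Dict.insert d v n)).Nodup := by
        rw [hkeys]
        refine List.Nodup.append hnd (List.nodup_singleton v) ?_
        intro a ha hb
        rw [List.mem_singleton] at hb
        subst hb
        exact absurd ((PySem.Dict.contains_iff_mem_keys d a).mpr ha) (by simp [hc'])
      rw [ih (n + 1) _ hnd', hitems, hkeys]
      have hk : (PySem.Dict.keys d).contains v = false := by
        rw [List.contains_eq_mem, decide_eq_false_iff_not]
        intro hm
        exact absurd ((PySem.Dict.contains_iff_mem_keys d v).mpr hm) (by simp [hc'])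
      rw [fiSpec, if_neg (by simpa using hk), List.append_assoc]
      rfl

lemma fiSpec_keys (ov : List String) :
    ∀ (seen : List String) (n : Int),
    seen ++ (fiSpec seen n ov).map Prod.fst = ov.foldl PySem.Set.add seen := by
  induction ov with
  | nil => intro seen n; simp [fiSpec]
  | cons v vs ih =>
    intro seen n
    rw [List.foldl_cons]
    by_cases hs : v ∈ seen
    · have : PySem.Set.add seen v = seen := by simp [PySem.Set.add, hs]
      rw [this, fiSpec, if_pos (by simp [hs])]
      exact ih seen (n + 1)
    · have : PySem.Set.add seen v = seen ++ [v] := by simp [PySem.Set.add, hs]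
      rw [this, fiSpec, if_neg (by simp [hs])]
      rw [← ih (seen ++ [v]) (n + 1), List.map_cons, List.append_assoc]
      rfl

lemma fiSpec_lb (ov : List String) :
    ∀ (seen : List String) (n : Int) (p : String × Int), p ∈ fiSpec seen n ov → n ≤ p.2 := by
  induction ov with
  | nil => intro seen n p h; simp [fiSpec] at h
  | cons v vs ih =>
    intro seen n p h
    rw [fiSpec] at h
    split_ifs at h with hs
    · exact le_trans (by omega) (ih seen (n + 1) p h)
    · rcases List.mem_cons.mp h with h | h
      · subst h; exact le_refl n
      · exact le_trans (by omega) (ih (seen ++ [v]) (n + 1) p h)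

lemma fiSpec_pairwise (ov : List String) :
    ∀ (seen : List String) (n : Int),
    (fiSpec seen n ov).Pairwise (fun a b => a.2 < b.2) := by
  induction ov with
  | nil => intro seen n; simp [fiSpec]
  | cons v vs ih =>
    intro seen n
    rw [fiSpec]
    split_ifs with hs
    · exact ih seen (n + 1)
    · refine List.pairwise_cons.mpr ⟨?_, ih (seen ++ [v]) (n + 1)⟩
      intro p hp
      have := fiSpec_lb vs (seen ++ [v]) (n + 1) p hp
      omega

-- B's argmax loop over pairs with strictly increasing indices picks the last matching pair.
lemma argmax_fold (pv : List String) (l : List (String × Int)) :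
    ∀ (acc : String × Int), (∀ p ∈ l, acc.2 < p.2) → l.Pairwise (fun a b => a.2 < b.2) →
    l.foldl (fun acc p => if pv.contains p.1 && acc.2 < p.2 then p else acc) acc
      = (l.filter (fun p => pv.contains p.1)).getLastD acc := by
  induction l with
  | nil => intro acc _ _; simp
  | cons p l ih =>
    intro acc hlb hpw
    have hp : acc.2 < p.2 := hlb p (List.mem_cons_self ..)
    rcases List.pairwise_cons.mp hpw with ⟨hrest, hpw'⟩
    rw [List.foldl_cons]
    by_cases hm : p.1 ∈ pv
    · rw [if_pos (by simp [hm, hp])]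
      rw [ih p hrest hpw',
        show (p :: l).filter (fun q => pv.contains q.1) = p :: l.filter (fun q => pv.contains q.1)
          by simp [hm],
        List.getLastD_cons]
    · rw [if_neg (by simp [hm])]
      rw [ih acc (fun q hq => lt_trans hp (hrest q hq)) hpw',
        show (p :: l).filter (fun q => pv.contains q.1) = l.filter (fun q => pv.contains q.1)
          by simp [hm]]

lemma getLastD_fst (l : List (String × Int)) (d : String × Int) :
    (l.getLastD d).1 = (l.map Prod.fst).getLastD d.1 := by
  induction l generalizing d with
  | nil => rfl
  | cons p l ih => rw [List.getLastD_cons, List.map_cons, List.getLastD_cons]; exact ih p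

-- ===== VERDICT (by name: the statement is the Claim_ definition above) =====
theorem get_correct_value_spec : Claim_equal_get_correct_value := by
  intro pv ov _
  unfold Spec_get_correct_value
  -- A computes the last element of the pv-filter of the ordered dedup of ov.
  have hA : get_correct_value pv ov
      = ((ov.foldl PySem.Set.add ([] : List String)).filter (fun v => pv.contains v)).getLastD "" := by
    simp only [get_correct_value]
    have h1 : (fun (cv : List String) (val1 : String) =>
        pv.foldl (fun cv val2 => if val1 == val2 && !(cv.contains val1) then cv ++ [val1] else cv) cv)
        = (fun (cv : List String) (v : String) =>
            if pv.contains v && !(cv.contains v) then cv ++ [v] else cv) := by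
      funext cv v; exact inner_loop pv v cv
    rw [h1, outer_loop pv ov ([] : List String) ([] : List String) (by simp)]
    generalize ((ov.foldl PySem.Set.add ([] : List String)).filter (fun v => pv.contains v)) = L
    cases L <;> simp
  -- B's dict items are the first-occurrence pairs fiSpec [] 0 ov.
  have hItems : (((PySem.List.enumerate ov).foldl
      (fun d p => if !(PySem.Dict.contains d p.2) then PySem.Dict.insert d p.2 p.1 else d)
      (PySem.Dict.empty : PySem.Dict String Int)).items) = fiSpec [] 0 ov := by
    have h := dict_build ov 0 PySem.Dict.empty PySem.Dict.nodup_keys_empty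
    simpa [PySem.Dict.empty, PySem.Dict.items, PySem.Dict.keys] using h
  have hB : get_correct_value_alt pv ov
      = (((fiSpec [] 0 ov).filter (fun p => pv.contains p.1)).getLastD (("", -1) : String × Int)).1 := by
    have hdef : get_correct_value_alt pv ov
        = ((((PySem.List.enumerate ov).foldl
            (fun d p => if !(PySem.Dict.contains d p.2) then PySem.Dict.insert d p.2 p.1 else d)
            (PySem.Dict.empty : PySem.Dict String Int)).items).foldl
            (fun acc p => if PySem.Set.contains (PySem.Set.ofList pv) p.1 && acc.2 < p.2 then p else acc)
            (("", -1) : String × Int)).1 := rfl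
    rw [hdef, hItems]
    simp only [contains_ofList]
    rw [argmax_fold pv (fiSpec [] 0 ov) ("", -1)
      (fun p hp => lt_of_lt_of_le (by norm_num) (fiSpec_lb ov [] 0 p hp))
      (fiSpec_pairwise ov [] 0)]
  rw [hA, hB, getLastD_fst]
  have hmapfil : ((fiSpec [] 0 ov).filter (fun p => pv.contains p.1)).map Prod.fst
      = ((fiSpec [] 0 ov).map Prod.fst).filter (fun v => pv.contains v) := by
    rw [List.filter_map]; rfl
  rw [hmapfil, show ((fiSpec [] 0 ov).map Prod.fst) = ov.foldl PySem.Set.add [] by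
    have := fiSpec_keys ov [] 0; simpa using this]
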